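-- pv_equiv track=rewrite | github.com/HeatherFryling/AlgoStudy | DynamicProgramming/knapsack_multiple_constraints/knapsack_multiple_constraints.py | top_down_helper
-- ===== SOURCE A (Python) =====
-- def top_down_helper(weights, sizes, values, i,  w, s, dp):
--     if i == 0:
--         return 0
--     if w == 0:
--         return 0
--     if s == 0:
--         return 0
--     if (i, w, s) in dp.keys():
--         return dp[(i, w, s)]
--     prev = top_down_helper(weights, sizes, values, i - 1, w, s, dp)
--     if weights[i - 1] <= w and sizes[i - 1] <= s:
--         curr = values[i - 1] + \
--             top_down_helper(weights, sizes, values, i - 1, \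
--                 w - weights[i - 1], s - sizes[i - 1], dp)
--         dp[(i, w, s)] = max(curr, prev)
--     else:
--         dp[(i, w, s)] = prev
--     return dp[(i, w, s)]
-- ===== SOURCE B (Python) =====
-- def top_down_helper(weights, sizes, values, i, w, s, dp):
--     # Bottom-up level DP over the reachable states; reads dp but (unlike A) does
--     # not mutate it -- the equivalence is about the return value only.
--     if i == 0 or w == 0 or s == 0:
--         return 0
--     # phase 1: needed (remaining-weight, remaining-size) pairs, level i down to 1
--     levels = []
--     cur = {(w, s)}
--     for j in range(i, 1, -1):
--         levels.append(cur)
--         wj, sj = weights[j - 1], sizes[j - 1]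
--         nxt = set()
--         for (x, y) in cur:
--             if (j, x, y) in dp:
--                 continue
--             nxt.add((x, y))
--             if wj <= x and sj <= y and x != wj and y != sj:
--                 nxt.add((x - wj, y - sj))
--         cur = nxt
--     levels.append(cur)
--
--     val = {}
--
--     def get(j, x, y):
--         if j == 0 or x == 0 or y == 0:
--             return 0
--         if (j, x, y) in dp:
--             return dp[(j, x, y)]
--         return val[(j, x, y)]
--
--     # phase 2: fill values bottom-up, level 1 up to i
--     j = 1
--     for states in reversed(levels):
--         wj, sj, vj = weights[j - 1], sizes[j - 1], values[j - 1]
--         for (x, y) in states: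
--             if (j, x, y) in dp:
--                 continue
--             prev = get(j - 1, x, y)
--             if wj <= x and sj <= y:
--                 val[(j, x, y)] = max(vj + get(j - 1, x - wj, y - sj), prev)
--             else:
--                 val[(j, x, y)] = prev
--         j += 1
--     return get(i, w, s)
-- ===== Notes on version B (the rewrite author's own statement) =====
-- stated objective: alternative
-- what changed: A's top-down memoized recursion that writes into the caller's dp is replaced by an iterative two-phase bottom-up DP: a downward pass collects the reachable (remaining-weight, remaining-size) states per item level, then an upward pass fills a fresh value table level by level, consulting dp read-only (B does not reproduce A's in-place mutation of dp; the equivalence is about the return value).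
-- outside the precondition, e.g. on top_down_helper([1], [1], [5], 2, 3, 3, {(2, 3, 3): 9}): A returns 9, B raises IndexError
import Mathlib
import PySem

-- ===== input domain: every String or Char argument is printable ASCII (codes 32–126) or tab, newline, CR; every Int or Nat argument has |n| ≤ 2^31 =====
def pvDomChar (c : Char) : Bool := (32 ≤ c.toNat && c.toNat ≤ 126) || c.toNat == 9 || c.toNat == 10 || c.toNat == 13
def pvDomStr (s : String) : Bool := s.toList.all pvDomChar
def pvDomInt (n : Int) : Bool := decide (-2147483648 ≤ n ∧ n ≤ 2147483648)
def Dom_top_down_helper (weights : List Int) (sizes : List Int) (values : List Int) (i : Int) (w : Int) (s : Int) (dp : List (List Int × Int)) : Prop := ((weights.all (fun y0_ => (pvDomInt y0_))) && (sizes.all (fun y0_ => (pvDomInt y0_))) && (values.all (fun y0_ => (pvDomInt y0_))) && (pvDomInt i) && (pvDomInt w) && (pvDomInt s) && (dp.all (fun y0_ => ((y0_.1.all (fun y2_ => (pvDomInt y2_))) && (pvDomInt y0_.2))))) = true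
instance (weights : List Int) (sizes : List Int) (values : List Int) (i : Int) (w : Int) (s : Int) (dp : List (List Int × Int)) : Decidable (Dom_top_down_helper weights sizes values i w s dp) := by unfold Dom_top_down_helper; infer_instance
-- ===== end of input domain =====

-- B replaces A's top-down memoized recursion (which mutates dp) by a two-phase bottom-up
-- DP over the reachable states, reading dp but never writing it: the equivalence proved
-- here is about the RETURN value only (A's in-place mutation of dp is not reproduced).

-- ===== PORT A =====
-- A's recursion decreases i by 1 per call; the Nat fuel (set to i.toNat + 1 at the top
-- call) only makes it total — under Pre_ (0 ≤ i) it never runs out. The dict is threaded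
-- because A mutates dp; the returned Int is the first component.
def tdhGo (weights : List Int) (sizes : List Int) (values : List Int) :
    Nat → Int → Int → Int → PySem.Dict (List Int) Int → Int × PySem.Dict (List Int) Int
  | 0, _, _, _, dp => (0, dp)
  | Nat.succ fuel, i, w, s, dp =>
    if i = 0 then (0, dp)
    else if w = 0 then (0, dp)
    else if s = 0 then (0, dp)
    else
      match dp.get? [i, w, s] with
      | some v => (v, dp)
      | none =>
        let r1 := tdhGo weights sizes values fuel (i - 1) w s dp
        let wi := (PySem.List.pyGet? weights (i - 1)).getD 0   -- weights[i-1]; index in range under Pre_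
        let si := (PySem.List.pyGet? sizes (i - 1)).getD 0     -- sizes[i-1]
        if wi ≤ w ∧ si ≤ s then
          let vi := (PySem.List.pyGet? values (i - 1)).getD 0  -- values[i-1]
          let r2 := tdhGo weights sizes values fuel (i - 1) (w - wi) (s - si) r1.2
          let d' := r2.2.insert [i, w, s] (max (vi + r2.1) r1.1)
          (d'.getD [i, w, s] 0, d')               -- A returns dp[(i, w, s)] after the write
        else
          let d' := r1.2.insert [i, w, s] r1.1
          (d'.getD [i, w, s] 0, d')

def top_down_helper (weights : List Int) (sizes : List Int) (values : List Int) (i : Int) (w : Int) (s : Int) (dp : List (List Int × Int)) : Int :=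
  (tdhGo weights sizes values (i.toNat + 1) i w s (PySem.Dict.mk dp)).1

-- ===== PORT B =====
-- phase 1 inner loop: children of the needed states of level j (set iteration is consumed
-- only into another set / a dict looked up afterwards, so the result is order-independent)
def altStep (dp : PySem.Dict (List Int) Int) (j wj sj : Int)
    (nxt : PySem.Set (Int × Int)) (p : Int × Int) : PySem.Set (Int × Int) :=
  if (dp.get? [j, p.1, p.2]).isSome then nxt
  else
    let nxt1 := PySem.Set.add nxt (p.1, p.2)
    if wj ≤ p.1 ∧ sj ≤ p.2 ∧ p.1 ≠ wj ∧ p.2 ≠ sj then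
      PySem.Set.add nxt1 (p.1 - wj, p.2 - sj)
    else nxt1

def altExpand (weights : List Int) (sizes : List Int) (dp : PySem.Dict (List Int) Int)
    (j : Int) (cur : PySem.Set (Int × Int)) : PySem.Set (Int × Int) :=
  cur.foldl
    (altStep dp j ((PySem.List.pyGet? weights (j - 1)).getD 0)   -- wj = weights[j-1], sj = sizes[j-1]
      ((PySem.List.pyGet? sizes (j - 1)).getD 0))
    PySem.Set.empty

-- phase 1 loop 'for j in range(i, 1, -1)' (n = i - 1 iterations) plus the final append
def altLevels (weights : List Int) (sizes : List Int) (dp : PySem.Dict (List Int) Int) :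
    Nat → Int → PySem.Set (Int × Int) → List (PySem.Set (Int × Int))
  | 0, _, cur => [cur]
  | Nat.succ n, j, cur => cur :: altLevels weights sizes dp n (j - 1) (altExpand weights sizes dp j cur)

-- the nested 'get' helper of Source B; the val lookup is getD 0: the proved invariant
-- guarantees the key is present exactly where Python's val[(j, x, y)] is consulted
def altGet (dp val : PySem.Dict (List Int) Int) (j x y : Int) : Int :=
  if j = 0 ∨ x = 0 ∨ y = 0 then 0
  else
    match dp.get? [j, x, y] with
    | some v => v
    | none => (val.get? [j, x, y]).getD 0

-- phase 2 inner loop over one level's states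
def altFillStep (dp : PySem.Dict (List Int) Int) (j wj sj vj : Int)
    (val : PySem.Dict (List Int) Int) (p : Int × Int) : PySem.Dict (List Int) Int :=
  if (dp.get? [j, p.1, p.2]).isSome then val
  else
    let prev := altGet dp val (j - 1) p.1 p.2
    if wj ≤ p.1 ∧ sj ≤ p.2 then
      val.insert [j, p.1, p.2] (max (vj + altGet dp val (j - 1) (p.1 - wj) (p.2 - sj)) prev)
    else val.insert [j, p.1, p.2] prev

def altFillLevel (weights : List Int) (sizes : List Int) (values : List Int)
    (dp : PySem.Dict (List Int) Int) (j : Int) (states : List (Int × Int))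
    (val : PySem.Dict (List Int) Int) : PySem.Dict (List Int) Int :=
  states.foldl
    (altFillStep dp j ((PySem.List.pyGet? weights (j - 1)).getD 0)   -- wj, sj, vj = weights/sizes/values[j-1]
      ((PySem.List.pyGet? sizes (j - 1)).getD 0)
      ((PySem.List.pyGet? values (j - 1)).getD 0))
    val

-- phase 2 loop 'for states in reversed(levels)' with j counting up from 1
def altFill (weights : List Int) (sizes : List Int) (values : List Int)
    (dp : PySem.Dict (List Int) Int) :
    List (PySem.Set (Int × Int)) → Int → PySem.Dict (List Int) Int → PySem.Dict (List Int) Int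
  | [], _, val => val
  | L :: rest, j, val => altFill weights sizes values dp rest (j + 1) (altFillLevel weights sizes values dp j L val)

def top_down_helper_alt (weights : List Int) (sizes : List Int) (values : List Int) (i : Int) (w : Int) (s : Int) (dp : List (List Int × Int)) : Int :=
  if i = 0 ∨ w = 0 ∨ s = 0 then 0
  else
    let d := PySem.Dict.mk dp
    let levels := altLevels weights sizes d (i.toNat - 1) i (PySem.Set.add PySem.Set.empty (w, s))
    let val := altFill weights sizes values d levels.reverse 1 PySem.Dict.empty
    altGet d val i w s

-- ===== PRECONDITION & SPEC =====
-- Pre_ excludes negative i (A recurses without reaching a base case: RecursionError) and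
-- i exceeding a list's length, where A in general raises IndexError; on such inputs A can
-- still return when pre-seeded dp entries happen to shield every list access — those
-- accidental returns are excluded too (see claim.json "cites").
def Pre_top_down_helper (weights : List Int) (sizes : List Int) (values : List Int) (i : Int) (w : Int) (s : Int) (dp : List (List Int × Int)) : Prop :=
  0 ≤ i ∧ i ≤ (weights.length : Int) ∧ i ≤ (sizes.length : Int) ∧ i ≤ (values.length : Int)
instance (weights : List Int) (sizes : List Int) (values : List Int) (i : Int) (w : Int) (s : Int) (dp : List (List Int × Int)) : Decidable (Pre_top_down_helper weights sizes values i w s dp) := by unfold Pre_top_down_helper; infer_instance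

def pvWitness_top_down_helper : List Int × List Int × List Int × Int × Int × Int × (List (List Int × Int)) :=
  ([2, 1], [1, 2], [3, 4], 2, 5, 5, [([1, 3, 3], 7)])

def Spec_top_down_helper (weights : List Int) (sizes : List Int) (values : List Int) (i : Int) (w : Int) (s : Int) (dp : List (List Int × Int)) (out : Int) : Prop := out = top_down_helper_alt weights sizes values i w s dp
instance (weights : List Int) (sizes : List Int) (values : List Int) (i : Int) (w : Int) (s : Int) (dp : List (List Int × Int)) (out : Int) : Decidable (Spec_top_down_helper weights sizes values i w s dp out) := by unfold Spec_top_down_helper; infer_instance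

-- ===== CLAIM (what is proved, stated in full; the proofs are below) =====
def Claim_equal_top_down_helper : Prop := ∀ (weights : List Int) (sizes : List Int) (values : List Int) (i : Int) (w : Int) (s : Int) (dp : List (List Int × Int)), Dom_top_down_helper weights sizes values i w s dp → Pre_top_down_helper weights sizes values i w s dp → Spec_top_down_helper weights sizes values i w s dp (top_down_helper weights sizes values i w s dp)

-- ===== LEMMAS AND PROOFS =====

-- The common pure recurrence V (proof-only): value of state (j, x, y) over the ORIGINAL
-- dict d; both ports are shown to compute specV … i.toNat w s.
def specV (weights : List Int) (sizes : List Int) (values : List Int)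
    (d : PySem.Dict (List Int) Int) : Nat → Int → Int → Int
  | 0, _, _ => 0
  | Nat.succ k, x, y =>
    if x = 0 ∨ y = 0 then 0
    else
      match d.get? [(k : Int) + 1, x, y] with
      | some v => v
      | none =>
        let wj := (PySem.List.pyGet? weights (k : Int)).getD 0
        let sj := (PySem.List.pyGet? sizes (k : Int)).getD 0
        let vj := (PySem.List.pyGet? values (k : Int)).getD 0
        let prev := specV weights sizes values d k x y
        if wj ≤ x ∧ sj ≤ y then
          max (vj + specV weights sizes values d k (x - wj) (y - sj)) prev
        else prev

-- A's dict invariant: d extends d0, and every new entry is a non-base key [j,x,y] absent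
-- from d0 holding exactly specV … j.toNat x y.
def DExt (weights sizes values : List Int) (d0 d : PySem.Dict (List Int) Int) : Prop :=
  (∀ k v, d0.get? k = some v → d.get? k = some v) ∧
  (∀ k v, d.get? k = some v → d0.get? k = some v ∨
    ∃ (j x y : Int), k = [j, x, y] ∧ 1 ≤ j ∧ x ≠ 0 ∧ y ≠ 0 ∧ d0.get? k = none ∧
      v = specV weights sizes values d0 j.toNat x y)

theorem tdhGo_spec (weights sizes values : List Int) (d0 : PySem.Dict (List Int) Int) :
    ∀ (fuel : Nat) (i w s : Int) (d : PySem.Dict (List Int) Int),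
      0 ≤ i → i.toNat < fuel → DExt weights sizes values d0 d →
      (tdhGo weights sizes values fuel i w s d).1 = specV weights sizes values d0 i.toNat w s ∧
      DExt weights sizes values d0 (tdhGo weights sizes values fuel i w s d).2 := by
  intro fuel
  induction fuel with
  | zero => intro i w s d h0 hf hext; omega
  | succ fuel ih =>
    intro i w s d h0 hf hext
    by_cases hi : i = 0
    · subst hi
      simp only [tdhGo, if_pos rfl]
      exact ⟨by simp [specV], hext⟩
    · obtain ⟨k, hk⟩ : ∃ k, i.toNat = k + 1 := ⟨i.toNat - 1, by omega⟩
      have hki : (k : Int) + 1 = i := by omega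
      have hki' : (k : Int) = i - 1 := by omega
      have hkt : (i - 1).toNat = k := by omega
      have hkf : (i - 1).toNat < fuel := by omega
      by_cases hw : w = 0
      · subst hw
        simp only [tdhGo, if_neg hi, if_pos rfl]
        refine ⟨?_, hext⟩
        rw [hk]; simp [specV]
      · by_cases hs : s = 0
        · subst hs
          simp only [tdhGo, if_neg hi, if_neg hw, if_pos rfl]
          refine ⟨?_, hext⟩
          rw [hk]; simp [specV]
        · cases hd : d.get? [i, w, s] with
          | some v =>
            simp only [tdhGo, if_neg hi, if_neg hw, if_neg hs, hd]
            refine ⟨?_, hext⟩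
            rcases hext.2 _ _ hd with hd0 | ⟨j', x', y', hkeq, hj', hx', hy', hn0, hveq⟩
            · rw [hk]
              simp only [specV, if_neg (show ¬(w = 0 ∨ s = 0) by tauto), hki, hd0]
            · obtain ⟨e1, e2, e3⟩ : j' = i ∧ x' = w ∧ y' = s := by
                injection hkeq with a b; injection b with b c; injection c with c _
                exact ⟨a.symm, b.symm, c.symm⟩
              subst e1; subst e2; subst e3
              exact hveq
          | none =>
            have hd0 : d0.get? [i, w, s] = none := by
              cases hd0 : d0.get? [i, w, s] with
              | none => rfl
              | some v => rw [hext.1 _ _ hd0] at hd; exact absurd hd (by simp)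
            obtain ⟨ih1, ih2⟩ := ih (i - 1) w s d (by omega) hkf hext
            rw [hkt] at ih1
            set wi := (PySem.List.pyGet? weights (i - 1)).getD 0 with hwi
            set si := (PySem.List.pyGet? sizes (i - 1)).getD 0 with hsi
            set vi := (PySem.List.pyGet? values (i - 1)).getD 0 with hvi
            have hspec : specV weights sizes values d0 i.toNat w s =
                if wi ≤ w ∧ si ≤ s then
                  max (vi + specV weights sizes values d0 k (w - wi) (s - si))
                    (specV weights sizes values d0 k w s)
                else specV weights sizes values d0 k w s := by
              rw [hk]
              simp only [specV, if_neg (show ¬(w = 0 ∨ s = 0) by tauto), hki, hd0]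
              rw [hwi, hsi, hvi, hki']
            have hextIns : ∀ (d' : PySem.Dict (List Int) Int) (v' : Int),
                DExt weights sizes values d0 d' →
                v' = specV weights sizes values d0 i.toNat w s →
                DExt weights sizes values d0 (d'.insert [i, w, s] v') := by
              intro d' v' hext' hv'
              constructor
              · intro k1 v1 h1
                rw [PySem.Dict.get?_insert]
                split_ifs with he
                · rw [he] at h1; rw [h1] at hd0; exact absurd hd0 (by simp)
                · exact hext'.1 _ _ h1
              · intro k1 v1 h1
                rw [PySem.Dict.get?_insert] at h1
                split_ifs at h1 with he
                · right
                  refine ⟨i, w, s, he, by omega, hw, hs, by rw [he]; exact hd0, ?_⟩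
                  injection h1 with h1'; rw [← h1', hv']
                · exact hext'.2 _ _ h1
            by_cases hbr : wi ≤ w ∧ si ≤ s
            · simp only [tdhGo, if_neg hi, if_neg hw, if_neg hs, hd, ← hwi, ← hsi, ← hvi, if_pos hbr]
              obtain ⟨jh1, jh2⟩ := ih (i - 1) (w - wi) (s - si)
                (tdhGo weights sizes values fuel (i - 1) w s d).2 (by omega) hkf ih2
              rw [hkt] at jh1
              have hv' : max (vi + (tdhGo weights sizes values fuel (i - 1) (w - wi) (s - si)
                  (tdhGo weights sizes values fuel (i - 1) w s d).2).1)
                  (tdhGo weights sizes values fuel (i - 1) w s d).1 =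
                  specV weights sizes values d0 i.toNat w s := by
                rw [jh1, ih1, hspec, if_pos hbr]
              refine ⟨?_, ?_⟩
              · rw [PySem.Dict.getD_insert_self, hv']
              · exact hextIns _ _ jh2 hv'
            · simp only [tdhGo, if_neg hi, if_neg hw, if_neg hs, hd, ← hwi, ← hsi, ← hvi, if_neg hbr]
              have hv' : (tdhGo weights sizes values fuel (i - 1) w s d).1 =
                  specV weights sizes values d0 i.toNat w s := by
                rw [ih1, hspec, if_neg hbr]
              refine ⟨?_, ?_⟩
              · rw [PySem.Dict.getD_insert_self, hv']
              · exact hextIns _ _ ih2 hv'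

-- ===== B-side invariants =====

def NZ (L : List (Int × Int)) : Prop := ∀ p ∈ L, p.1 ≠ 0 ∧ p.2 ≠ 0

def Avail (d val : PySem.Dict (List Int) Int) (j x y : Int) : Prop :=
  j = 0 ∨ x = 0 ∨ y = 0 ∨ (d.get? [j, x, y]).isSome = true ∨ (val.get? [j, x, y]).isSome = true

def ValGood (weights sizes values : List Int) (d val : PySem.Dict (List Int) Int) : Prop :=
  ∀ k v, val.get? k = some v → ∃ (j x y : Int), k = [j, x, y] ∧ 1 ≤ j ∧
    v = specV weights sizes values d j.toNat x y

theorem altGet_eq (weights sizes values : List Int) (d val : PySem.Dict (List Int) Int)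
    (j x y : Int) (hg : ValGood weights sizes values d val) (h0 : 0 ≤ j)
    (ha : Avail d val j x y) :
    altGet d val j x y = specV weights sizes values d j.toNat x y := by
  by_cases hb : j = 0 ∨ x = 0 ∨ y = 0
  · rw [altGet, if_pos hb]
    rcases hb with h | h
    · subst h; simp [specV]
    · cases hk : j.toNat with
      | zero => simp [specV]
      | succ k => simp [specV, h]
  · push_neg at hb
    obtain ⟨hj0, hx0, hy0⟩ := hb
    obtain ⟨k, hk⟩ : ∃ k, j.toNat = k + 1 := ⟨j.toNat - 1, by omega⟩
    have hkj : (k : Int) + 1 = j := by omega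
    rw [altGet, if_neg (by tauto), hk]
    cases hd : d.get? [j, x, y] with
    | some v =>
      simp only [specV, if_neg (show ¬(x = 0 ∨ y = 0) by tauto), hkj, hd]
    | none =>
      rcases ha with h | h | h | h | h
      · omega
      · exact absurd h hx0
      · exact absurd h hy0
      · rw [hd] at h; simp at h
      · obtain ⟨v, hv⟩ := Option.isSome_iff_exists.mp h
        obtain ⟨j', x', y', hkeq, hj', hval⟩ := hg _ _ hv
        obtain ⟨e1, e2, e3⟩ : j' = j ∧ x' = x ∧ y' = y := by
          injection hkeq with a b; injection b with b c; injection c with c _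
          exact ⟨a.symm, b.symm, c.symm⟩
        subst e1; subst e2; subst e3
        rw [hk] at hval
        simp [hv, hval]

theorem step_mono (dp : PySem.Dict (List Int) Int) (j wj sj : Int)
    (nxt : PySem.Set (Int × Int)) (p : Int × Int) (q : Int × Int) (hq : q ∈ nxt) :
    q ∈ altStep dp j wj sj nxt p := by
  unfold altStep
  split_ifs <;> simp [PySem.Set.mem_add, hq]

theorem foldl_step_mono (dp : PySem.Dict (List Int) Int) (j wj sj : Int) :
    ∀ (cur : List (Int × Int)) (acc : PySem.Set (Int × Int)) (q : Int × Int), q ∈ acc →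
      q ∈ cur.foldl (altStep dp j wj sj) acc := by
  intro cur
  induction cur with
  | nil => intro acc q hq; exact hq
  | cons x rest ih =>
    intro acc q hq
    exact ih _ _ (step_mono dp j wj sj acc x q hq)

theorem expand_mem (weights sizes : List Int) (d : PySem.Dict (List Int) Int) (j : Int)
    (cur : PySem.Set (Int × Int)) (p : Int × Int) (hp : p ∈ cur)
    (hd : (d.get? [j, p.1, p.2]).isSome = false) :
    (p.1, p.2) ∈ altExpand weights sizes d j cur ∧
    (((PySem.List.pyGet? weights (j - 1)).getD 0 ≤ p.1 ∧ (PySem.List.pyGet? sizes (j - 1)).getD 0 ≤ p.2 ∧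
      p.1 ≠ (PySem.List.pyGet? weights (j - 1)).getD 0 ∧ p.2 ≠ (PySem.List.pyGet? sizes (j - 1)).getD 0) →
      (p.1 - (PySem.List.pyGet? weights (j - 1)).getD 0, p.2 - (PySem.List.pyGet? sizes (j - 1)).getD 0) ∈ altExpand weights sizes d j cur) := by
  set wj := (PySem.List.pyGet? weights (j - 1)).getD 0 with hwj
  set sj := (PySem.List.pyGet? sizes (j - 1)).getD 0 with hsj
  show _ ∈ List.foldl (altStep d j wj sj) PySem.Set.empty cur ∧ _
  have key : ∀ (cur : List (Int × Int)) (acc : PySem.Set (Int × Int)), p ∈ cur →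
      (p.1, p.2) ∈ cur.foldl (altStep d j wj sj) acc ∧
      ((wj ≤ p.1 ∧ sj ≤ p.2 ∧ p.1 ≠ wj ∧ p.2 ≠ sj) →
        (p.1 - wj, p.2 - sj) ∈ cur.foldl (altStep d j wj sj) acc) := by
    intro cur
    induction cur with
    | nil => intro acc h; simp at h
    | cons x rest ih =>
      intro acc h
      rcases List.mem_cons.mp h with rfl | hmem
      · constructor
        · refine foldl_step_mono d j wj sj rest _ _ ?_
          unfold altStep
          rw [if_neg (by simp [hd])]
          split_ifs <;> simp [PySem.Set.mem_add]
        · intro hc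
          refine foldl_step_mono d j wj sj rest _ _ ?_
          unfold altStep
          rw [if_neg (by simp [hd]), if_pos hc]
          simp [PySem.Set.mem_add]
      · exact ih _ hmem
  exact key cur _ hp

theorem expand_nz (weights sizes : List Int) (d : PySem.Dict (List Int) Int) (j : Int)
    (cur : PySem.Set (Int × Int)) (h : NZ cur) : NZ (altExpand weights sizes d j cur) := by
  set wj := (PySem.List.pyGet? weights (j - 1)).getD 0 with hwj
  set sj := (PySem.List.pyGet? sizes (j - 1)).getD 0 with hsj
  show NZ (List.foldl (altStep d j wj sj) PySem.Set.empty cur)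
  have key : ∀ (cur : List (Int × Int)) (acc : PySem.Set (Int × Int)), NZ acc → NZ cur →
      NZ (cur.foldl (altStep d j wj sj) acc) := by
    intro cur
    induction cur with
    | nil => intro acc hacc _; exact hacc
    | cons x rest ih =>
      intro acc hacc hcur
      refine ih _ ?_ (fun p hp => hcur p (List.mem_cons_of_mem _ hp))
      intro q hq
      unfold altStep at hq
      split_ifs at hq with h1 h2
      · exact hacc q hq
      · rcases (PySem.Set.mem_add _ _ _).mp hq with hq' | rfl
        · rcases (PySem.Set.mem_add _ _ _).mp hq' with hq'' | rfl
          · exact hacc q hq''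
          · exact hcur x (List.mem_cons_self) 
        · obtain ⟨hx1, hx2⟩ := hcur x List.mem_cons_self
          exact ⟨by omega, by omega⟩
      · rcases (PySem.Set.mem_add _ _ _).mp hq with hq' | rfl
        · exact hacc q hq'
        · exact hcur x List.mem_cons_self
  exact key cur _ (fun p hp => by simp [PySem.Set.empty] at hp) h

theorem fillStep_mono (dp : PySem.Dict (List Int) Int) (j wj sj vj : Int)
    (val : PySem.Dict (List Int) Int) (p : Int × Int) (k : List Int)
    (h : (val.get? k).isSome = true) :
    ((altFillStep dp j wj sj vj val p).get? k).isSome = true := by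
  unfold altFillStep
  split_ifs with h1 h2
  · exact h
  · rw [PySem.Dict.get?_insert]; split_ifs <;> simp [h]
  · rw [PySem.Dict.get?_insert]; split_ifs <;> simp [h]

theorem altFillLevel_mono (weights sizes values : List Int) (d : PySem.Dict (List Int) Int) (j : Int) :
    ∀ (states : List (Int × Int)) (val : PySem.Dict (List Int) Int) (k : List Int),
      (val.get? k).isSome = true →
      ((altFillLevel weights sizes values d j states val).get? k).isSome = true := by
  intro states
  induction states with
  | nil => intro val k h; exact h
  | cons p rest ih =>
    intro val k h
    exact ih _ _ (fillStep_mono d j _ _ _ val p k h)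

theorem avail_mono (d val val' : PySem.Dict (List Int) Int) (j x y : Int)
    (hm : ∀ k, (val.get? k).isSome = true → (val'.get? k).isSome = true)
    (h : Avail d val j x y) : Avail d val' j x y := by
  unfold Avail at *
  rcases h with h | h | h | h | h
  · exact Or.inl h
  · exact Or.inr (Or.inl h)
  · exact Or.inr (Or.inr (Or.inl h))
  · exact Or.inr (Or.inr (Or.inr (Or.inl h)))
  · exact Or.inr (Or.inr (Or.inr (Or.inr (hm _ h))))

theorem avail_of_dp (d val : PySem.Dict (List Int) Int) (j x y : Int)
    (h : (d.get? [j, x, y]).isSome = true) : Avail d val j x y :=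
  Or.inr (Or.inr (Or.inr (Or.inl h)))

theorem avail_of_val (d val : PySem.Dict (List Int) Int) (j x y : Int)
    (h : (val.get? [j, x, y]).isSome = true) : Avail d val j x y :=
  Or.inr (Or.inr (Or.inr (Or.inr h)))

theorem fillLevel_spec (weights sizes values : List Int) (d : PySem.Dict (List Int) Int)
    (j : Int) (hj : 1 ≤ j) :
    ∀ (states : List (Int × Int)) (val : PySem.Dict (List Int) Int),
      ValGood weights sizes values d val → NZ states →
      (∀ p ∈ states, d.get? [j, p.1, p.2] = none →
        Avail d val (j - 1) p.1 p.2 ∧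
        (((PySem.List.pyGet? weights (j - 1)).getD 0 ≤ p.1 ∧ (PySem.List.pyGet? sizes (j - 1)).getD 0 ≤ p.2 ∧
          p.1 ≠ (PySem.List.pyGet? weights (j - 1)).getD 0 ∧ p.2 ≠ (PySem.List.pyGet? sizes (j - 1)).getD 0) →
          Avail d val (j - 1) (p.1 - (PySem.List.pyGet? weights (j - 1)).getD 0) (p.2 - (PySem.List.pyGet? sizes (j - 1)).getD 0))) →
      ValGood weights sizes values d (altFillLevel weights sizes values d j states val) ∧
      (∀ k, (val.get? k).isSome = true → ((altFillLevel weights sizes values d j states val).get? k).isSome = true) ∧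
      (∀ p ∈ states, Avail d (altFillLevel weights sizes values d j states val) j p.1 p.2) := by
  set wj := (PySem.List.pyGet? weights (j - 1)).getD 0 with hwj
  set sj := (PySem.List.pyGet? sizes (j - 1)).getD 0 with hsj
  set vj := (PySem.List.pyGet? values (j - 1)).getD 0 with hvj
  intro states
  induction states with
  | nil => intro val hval _ _; exact ⟨hval, fun k h => h, by simp⟩
  | cons p rest ih =>
    intro val hval hnz hclo
    have hnzp := hnz p List.mem_cons_self
    have hnzr : NZ rest := fun q hq => hnz q (List.mem_cons_of_mem _ hq)
    have hcons : altFillLevel weights sizes values d j (p :: rest) val =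
        altFillLevel weights sizes values d j rest (altFillStep d j wj sj vj val p) := rfl
    rw [hcons]
    by_cases hd : (d.get? [j, p.1, p.2]).isSome = true
    · have hstep : altFillStep d j wj sj vj val p = val := by unfold altFillStep; rw [if_pos hd]
      rw [hstep]
      obtain ⟨g1, g2, g3⟩ := ih val hval hnzr (fun q hq h => hclo q (List.mem_cons_of_mem _ hq) h)
      refine ⟨g1, g2, ?_⟩
      intro q hq
      rcases List.mem_cons.mp hq with rfl | hq'
      · exact avail_of_dp _ _ _ _ _ hd
      · exact g3 q hq'
    · have hdn : d.get? [j, p.1, p.2] = none := Option.not_isSome_iff_eq_none.mp hd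
      obtain ⟨hav1, hav2⟩ := hclo p List.mem_cons_self hdn
      have hprev : altGet d val (j - 1) p.1 p.2 = specV weights sizes values d (j - 1).toNat p.1 p.2 :=
        altGet_eq weights sizes values d val (j - 1) p.1 p.2 hval (by omega) hav1
      have hsub : (wj ≤ p.1 ∧ sj ≤ p.2) →
          altGet d val (j - 1) (p.1 - wj) (p.2 - sj) = specV weights sizes values d (j - 1).toNat (p.1 - wj) (p.2 - sj) := by
        intro hb
        refine altGet_eq weights sizes values d val (j - 1) _ _ hval (by omega) ?_
        by_cases hc : p.1 = wj ∨ p.2 = sj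
        · rcases hc with hc | hc
          · exact Or.inr (Or.inl (by omega))
          · exact Or.inr (Or.inr (Or.inl (by omega)))
        · push_neg at hc
          exact hav2 ⟨hb.1, hb.2, hc.1, hc.2⟩
      obtain ⟨k0, hk0⟩ : ∃ k0, j.toNat = k0 + 1 := ⟨j.toNat - 1, by omega⟩
      have hkj : (k0 : Int) = j - 1 := by omega
      have hkt : (j - 1).toNat = k0 := by omega
      have hkey : ∀ v', ((wj ≤ p.1 ∧ sj ≤ p.2) → v' = max (vj + specV weights sizes values d (j - 1).toNat (p.1 - wj) (p.2 - sj)) (specV weights sizes values d (j - 1).toNat p.1 p.2)) →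
          (¬(wj ≤ p.1 ∧ sj ≤ p.2) → v' = specV weights sizes values d (j - 1).toNat p.1 p.2) →
          v' = specV weights sizes values d j.toNat p.1 p.2 := by
        intro v' h1 h2
        rw [hk0]
        have hj1 : (k0 : Int) + 1 = j := by omega
        simp only [specV, if_neg (show ¬(p.1 = 0 ∨ p.2 = 0) by have := hnzp; tauto), hj1, hdn]
        rw [hkt] at h1 h2
        rw [hkj, ← hwj, ← hsj, ← hvj]
        split_ifs with hb
        · exact h1 hb
        · exact h2 hb
      have hstep : ∃ v', altFillStep d j wj sj vj val p = val.insert [j, p.1, p.2] v' ∧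
          v' = specV weights sizes values d j.toNat p.1 p.2 := by
        unfold altFillStep
        rw [if_neg hd]
        by_cases hb : wj ≤ p.1 ∧ sj ≤ p.2
        · refine ⟨_, by rw [if_pos hb], ?_⟩
          refine hkey _ (fun _ => ?_) (fun h => absurd hb h)
          rw [hprev, hsub hb]
        · refine ⟨_, by rw [if_neg hb], ?_⟩
          refine hkey _ (fun h => absurd h hb) (fun _ => ?_)
          rw [hprev]
      obtain ⟨v', hv', hvspec⟩ := hstep
      have hval1 : ValGood weights sizes values d (val.insert [j, p.1, p.2] v') := by
        intro k1 w1 hw1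
        rw [PySem.Dict.get?_insert] at hw1
        split_ifs at hw1 with he
        · refine ⟨j, p.1, p.2, he, by omega, ?_⟩
          injection hw1 with h1'
          rw [← h1', hvspec]
        · exact hval k1 w1 hw1
      have hmono1 : ∀ k1, (val.get? k1).isSome = true → ((val.insert [j, p.1, p.2] v').get? k1).isSome = true := by
        intro k1 h1
        rw [PySem.Dict.get?_insert]
        split_ifs <;> simp [h1]
      obtain ⟨g1, g2, g3⟩ := ih (val.insert [j, p.1, p.2] v') hval1 hnzr
        (by
          intro q hq hdq
          obtain ⟨a1, a2⟩ := hclo q (List.mem_cons_of_mem _ hq) hdq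
          exact ⟨avail_mono _ _ _ _ _ _ hmono1 a1, fun hc => avail_mono _ _ _ _ _ _ hmono1 (a2 hc)⟩)
      rw [hv']
      refine ⟨g1, fun k1 h1 => g2 k1 (hmono1 k1 h1), ?_⟩
      intro q hq
      rcases List.mem_cons.mp hq with rfl | hq'
      · refine avail_of_val _ _ _ _ _ ?_
        refine altFillLevel_mono weights sizes values d j rest _ _ ?_
        rw [PySem.Dict.get?_insert, if_pos rfl]
        rfl
      · exact g3 q hq'

theorem levels_length (weights sizes : List Int) (d : PySem.Dict (List Int) Int) :
    ∀ (n : Nat) (j : Int) (cur : PySem.Set (Int × Int)),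
      (altLevels weights sizes d n j cur).length = n + 1 := by
  intro n
  induction n with
  | zero => intro j cur; rfl
  | succ n ih => intro j cur; simp [altLevels, ih]

theorem fill_append (weights sizes values : List Int) (d : PySem.Dict (List Int) Int) :
    ∀ (A : List (PySem.Set (Int × Int))) (L : PySem.Set (Int × Int)) (j : Int) (val : PySem.Dict (List Int) Int),
      altFill weights sizes values d (A ++ [L]) j val =
      altFillLevel weights sizes values d (j + A.length) L (altFill weights sizes values d A j val) := by
  intro A
  induction A with
  | nil => intro L j val; simp [altFill]
  | cons L0 rest ih =>
    intro L j val
    simp only [List.cons_append, altFill, ih, List.length_cons]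
    congr 1
    push_cast
    ring

theorem fillAll_spec (weights sizes values : List Int) (d : PySem.Dict (List Int) Int) :
    ∀ (n : Nat) (j : Int) (cur : PySem.Set (Int × Int)) (val : PySem.Dict (List Int) Int),
      (j : Int) - (n : Int) = 1 → NZ cur → ValGood weights sizes values d val →
      ValGood weights sizes values d (altFill weights sizes values d (altLevels weights sizes d n j cur).reverse (j - n) val) ∧
      (∀ k, (val.get? k).isSome = true →
        ((altFill weights sizes values d (altLevels weights sizes d n j cur).reverse (j - n) val).get? k).isSome = true) ∧
      (∀ p ∈ cur, Avail d (altFill weights sizes values d (altLevels weights sizes d n j cur).reverse (j - n) val) j p.1 p.2) := by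
  intro n
  induction n with
  | zero =>
    intro j cur val hj hnz hval
    have hj1 : j = 1 := by omega
    subst hj1
    have hres : altFill weights sizes values d (altLevels weights sizes d 0 1 cur).reverse (1 - (0:Nat)) val =
        altFillLevel weights sizes values d 1 cur val := rfl
    rw [hres]
    obtain ⟨g1, g2, g3⟩ := fillLevel_spec weights sizes values d 1 (by omega) cur val hval hnz
      (fun p _ _ => ⟨Or.inl (by omega), fun _ => Or.inl (by omega)⟩)
    exact ⟨g1, g2, g3⟩
  | succ n ih =>
    intro j cur val hj hnz hval
    have hrev : (altLevels weights sizes d (n + 1) j cur).reverse =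
        (altLevels weights sizes d n (j - 1) (altExpand weights sizes d j cur)).reverse ++ [cur] := by
      simp [altLevels]
    have hlen : (altLevels weights sizes d n (j - 1) (altExpand weights sizes d j cur)).reverse.length = n + 1 := by
      rw [List.length_reverse, levels_length]
    have hstart : j - ((n + 1 : Nat) : Int) = (j - 1) - (n : Int) := by push_cast; ring
    rw [hrev, hstart, fill_append, hlen]
    have hjlev : (j - 1) - (n : Int) + ((n : Int) + 1) = j := by ring
    rw [show ((n + 1 : Nat) : Int) = (n : Int) + 1 by push_cast; ring] at *
    rw [hjlev]
    obtain ⟨g1, g2, g3⟩ := ih (j - 1) (altExpand weights sizes d j cur) val (by omega)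
      (expand_nz weights sizes d j cur hnz) hval
    set res' := altFill weights sizes values d
      (altLevels weights sizes d n (j - 1) (altExpand weights sizes d j cur)).reverse ((j - 1) - (n : Int)) val with hres'
    obtain ⟨f1, f2, f3⟩ := fillLevel_spec weights sizes values d j (by omega) cur res' g1 hnz
      (by
        intro p hp hdp
        have hd' : (d.get? [j, p.1, p.2]).isSome = false := by rw [hdp]; rfl
        obtain ⟨m1, m2⟩ := expand_mem weights sizes d j cur p hp hd'
        exact ⟨g3 _ m1, fun hc => g3 _ (m2 hc)⟩)
    exact ⟨f1, fun k h => f2 k (g2 k h), f3⟩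

-- ===== VERDICT (by name: the statement is the Claim_ definition above) =====
theorem top_down_helper_spec : Claim_equal_top_down_helper := by
  intro weights sizes values i w s dp _ hpre
  unfold Pre_top_down_helper at hpre
  obtain ⟨h0, hlw, hls, hlv⟩ := hpre
  show top_down_helper weights sizes values i w s dp = top_down_helper_alt weights sizes values i w s dp
  have hA : top_down_helper weights sizes values i w s dp =
      specV weights sizes values (PySem.Dict.mk dp) i.toNat w s := by
    unfold top_down_helper
    exact (tdhGo_spec weights sizes values (PySem.Dict.mk dp) (i.toNat + 1) i w s
      (PySem.Dict.mk dp) h0 (by omega) ⟨fun k v h => h, fun k v h => Or.inl h⟩).1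
  rw [hA]
  unfold top_down_helper_alt
  by_cases hb : i = 0 ∨ w = 0 ∨ s = 0
  · rw [if_pos hb]
    rcases hb with h | h
    · subst h; simp [specV]
    · cases hk : i.toNat with
      | zero => simp [specV]
      | succ k => simp [specV, h]
  · rw [if_neg hb]
    push_neg at hb
    obtain ⟨hi0, hw0, hs0⟩ := hb
    have h1i : 1 ≤ i := by omega
    have hcast : (1 : Int) = i - ((i.toNat - 1 : Nat) : Int) := by omega
    have hnz : NZ (PySem.Set.add PySem.Set.empty (w, s)) := by
      intro p hp
      rcases (PySem.Set.mem_add _ _ _).mp hp with hp' | rfl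
      · simp [PySem.Set.empty] at hp'
      · exact ⟨hw0, hs0⟩
    have hvg : ValGood weights sizes values (PySem.Dict.mk dp) PySem.Dict.empty := by
      intro k v h
      rw [PySem.Dict.get?_empty] at h
      exact absurd h (by simp)
    rw [hcast]
    obtain ⟨g1, g2, g3⟩ := fillAll_spec weights sizes values (PySem.Dict.mk dp)
      (i.toNat - 1) i (PySem.Set.add PySem.Set.empty (w, s)) PySem.Dict.empty
      (by omega) hnz hvg
    have hmem : (w, s) ∈ PySem.Set.add PySem.Set.empty (w, s) :=
      (PySem.Set.mem_add _ _ _).mpr (Or.inr rfl)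
    exact (altGet_eq weights sizes values (PySem.Dict.mk dp) _ i w s g1 h0 (g3 _ hmem)).symm
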